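-- pv_equiv track=rewrite | github.com/domRowan/cautious-barnacle | cautious-barnacle/sudoku/sudoku_solver.py | is_row_column_square_valid
-- ===== SOURCE A (Python) =====
-- def value_is_out_of_range_excluding_0(value):
--     return (value < 0) or (value >= 10)
--
-- def is_row_column_square_valid(row_column_square):
--     numbers_present = set()
--     row_or_column_is_complete = True
--
--     for value in row_column_square:
--         if value_is_out_of_range_excluding_0(value) or (value > 0 and value in numbers_present):
--             return False
--         else:
--             # Currently adding 0 to the set many times but not checking it
--             numbers_present.add(value)
--
--     return row_or_column_is_complete
-- ===== SOURCE B (Python) =====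
-- def is_row_column_square_valid(row_column_square):
--     nonzero = []
--     for value in row_column_square:
--         if value < 0 or value >= 10:
--             return False
--         if value > 0:
--             nonzero.append(value)
--     return len(nonzero) == len(set(nonzero))
-- ===== Notes on version B (the rewrite author's own statement) =====
-- stated objective: simpler
-- what changed: B validates only the 0..9 range inside the loop while collecting nonzero values, and detects duplicates after the loop by comparing len(nonzero) to len(set(nonzero)), instead of A's interleaved incremental set-membership test with early return on duplicates.
import Mathlib
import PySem

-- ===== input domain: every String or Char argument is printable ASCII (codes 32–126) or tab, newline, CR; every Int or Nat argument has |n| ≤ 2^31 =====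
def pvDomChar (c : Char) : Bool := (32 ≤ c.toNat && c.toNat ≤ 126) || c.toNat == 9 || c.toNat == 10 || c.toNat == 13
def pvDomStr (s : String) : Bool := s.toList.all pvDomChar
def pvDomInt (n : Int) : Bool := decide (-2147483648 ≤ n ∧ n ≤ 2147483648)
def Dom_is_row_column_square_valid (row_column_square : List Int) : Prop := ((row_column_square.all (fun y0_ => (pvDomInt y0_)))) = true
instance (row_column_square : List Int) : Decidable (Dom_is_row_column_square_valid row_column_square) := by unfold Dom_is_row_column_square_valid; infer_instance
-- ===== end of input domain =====

-- ===== PORT A =====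
-- B changes the decomposition: range check only in the loop, duplicate detection via a length comparison afterwards (objective: simpler).
def value_is_out_of_range_excluding_0 (value : Int) : Bool :=
  (value < 0) || (value >= 10)

def pvGoA : List Int → PySem.Set Int → Bool
  | [], _ => true
  | value :: rest, numbers_present =>
    if value_is_out_of_range_excluding_0 value || (value > 0 && PySem.Set.contains numbers_present value) then
      false
    else
      pvGoA rest (PySem.Set.add numbers_present value)

def is_row_column_square_valid (row_column_square : List Int) : Bool :=
  pvGoA row_column_square PySem.Set.empty

-- ===== PORT B =====
-- loop: validate range, collect nonzero values; none = early 'return False'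
def pvGoB : List Int → List Int → Option (List Int)
  | [], nonzero => some nonzero
  | value :: rest, nonzero =>
    if value < 0 || value >= 10 then
      none
    else
      pvGoB rest (if value > 0 then nonzero ++ [value] else nonzero)

def is_row_column_square_valid_alt (row_column_square : List Int) : Bool :=
  match pvGoB row_column_square [] with
  | none => false
  | some nonzero => nonzero.length == (PySem.Set.ofList nonzero).length

-- ===== PRECONDITION & SPEC =====
def Spec_is_row_column_square_valid (row_column_square : List Int) (out : Bool) : Prop := out = is_row_column_square_valid_alt row_column_square
instance (row_column_square : List Int) (out : Bool) : Decidable (Spec_is_row_column_square_valid row_column_square out) := by unfold Spec_is_row_column_square_valid; infer_instance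

-- ===== CLAIM (what is proved, stated in full; the proofs are below) =====
def Claim_equal_is_row_column_square_valid : Prop := ∀ (row_column_square : List Int), Dom_is_row_column_square_valid row_column_square → Spec_is_row_column_square_valid row_column_square (is_row_column_square_valid row_column_square)

-- ===== LEMMAS AND PROOFS =====

-- interpret the result of B's loop
def pvFinish : Option (List Int) → Bool
  | none => false
  | some nonzero => nonzero.length == (PySem.Set.ofList nonzero).length

theorem alt_eq_finish (l : List Int) :
    is_row_column_square_valid_alt l = pvFinish (pvGoB l []) := by
  unfold is_row_column_square_valid_alt pvFinish
  cases pvGoB l [] <;> rfl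

theorem length_ofList_eq_dedup (acc : List Int) :
    (PySem.Set.ofList acc).length = acc.dedup.length := by
  apply List.Perm.length_eq
  rw [List.perm_ext_iff_of_nodup (PySem.Set.nodup_ofList acc) (List.nodup_dedup acc)]
  intro a
  rw [PySem.Set.mem_ofList, List.mem_dedup]

theorem ofList_length_lt_of_not_nodup {acc : List Int} (h : ¬ acc.Nodup) :
    (PySem.Set.ofList acc).length < acc.length := by
  rw [length_ofList_eq_dedup]
  rcases lt_or_eq_of_le (List.Sublist.length_le (List.dedup_sublist acc)) with hlt | heq
  · exact hlt
  · exact absurd (List.dedup_eq_self.mp (List.Sublist.eq_of_length (List.dedup_sublist acc) heq)) h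

-- once a duplicate is in the accumulator, B's loop can only end in False
theorem pvGoB_dup_false (l : List Int) :
    ∀ acc : List Int, ¬ acc.Nodup → pvFinish (pvGoB l acc) = false := by
  induction l with
  | nil =>
    intro acc h
    simp only [pvGoB, pvFinish]
    exact decide_eq_false (Nat.ne_of_gt (ofList_length_lt_of_not_nodup h))
  | cons v rest ih =>
    intro acc h
    simp only [pvGoB]
    split
    · rfl
    · apply ih
      split
      · intro hn; exact h (List.Nodup.of_append_left hn)
      · exact h

-- main invariant: A's set and B's accumulator track the same positive values
theorem pvGo_agree (l : List Int) :
    ∀ (s : PySem.Set Int) (acc : List Int),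
      acc.Nodup →
      (∀ v : Int, 0 < v → (PySem.Set.contains s v = true ↔ v ∈ acc)) →
      pvGoA l s = pvFinish (pvGoB l acc) := by
  induction l with
  | nil =>
    intro s acc hnd _
    have hlen : (PySem.Set.ofList acc).length = acc.length := by
      rw [length_ofList_eq_dedup, List.dedup_eq_self.mpr hnd]
    simp [pvGoA, pvGoB, pvFinish, hlen]
  | cons v rest ih =>
    intro s acc hnd hmem
    by_cases h1 : v < 0
    · simp [pvGoA, pvGoB, value_is_out_of_range_excluding_0, pvFinish, h1]
    · by_cases h2 : v ≥ 10
      · simp [pvGoA, pvGoB, value_is_out_of_range_excluding_0, pvFinish, h2]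
      · by_cases hp : v > 0
        · by_cases hc : PySem.Set.contains s v = true
          · have hc' : v ∈ s := (PySem.Set.contains_iff s v).mp hc
            have hvacc : v ∈ acc := (hmem v hp).mp hc
            have hdup : ¬ (acc ++ [v]).Nodup := by
              intro hnd2
              exact (List.disjoint_of_nodup_append hnd2) hvacc (List.mem_singleton_self v)
            simp [pvGoA, pvGoB, value_is_out_of_range_excluding_0, h1, h2, hp, hc',
              pvGoB_dup_false rest (acc ++ [v]) hdup]
          · have hc' : v ∉ s := fun h => hc ((PySem.Set.contains_iff s v).mpr h)
            have hnd2 : (acc ++ [v]).Nodup := by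
              refine List.Nodup.append hnd (List.nodup_singleton v) ?_
              intro x hx hxv
              rw [List.mem_singleton] at hxv
              subst hxv
              exact hc ((hmem x hp).mpr hx)
            have hmem2 : ∀ w : Int, 0 < w →
                (PySem.Set.contains (PySem.Set.add s v) w = true ↔ w ∈ acc ++ [v]) := by
              intro w hw
              rw [PySem.Set.contains_iff, PySem.Set.mem_add, List.mem_append, List.mem_singleton,
                ← PySem.Set.contains_iff, hmem w hw]
            have hadd : PySem.Set.add s v = s ++ [v] := by
              simp [PySem.Set.add, hc']
            have hih := ih (PySem.Set.add s v) (acc ++ [v]) hnd2 hmem2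
            rw [hadd] at hih
            simp [pvGoA, pvGoB, value_is_out_of_range_excluding_0, h1, h2, hp, hc', hih]
        · have hmem2 : ∀ w : Int, 0 < w →
              (PySem.Set.contains (PySem.Set.add s v) w = true ↔ w ∈ acc) := by
            intro w hw
            rw [PySem.Set.contains_iff, PySem.Set.mem_add, ← PySem.Set.contains_iff, hmem w hw]
            constructor
            · rintro (h | h)
              · exact h
              · subst h; exact absurd hw hp
            · exact Or.inl
          simp [pvGoA, pvGoB, value_is_out_of_range_excluding_0, h1, h2, hp,
            ih (PySem.Set.add s v) acc hnd hmem2]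

-- ===== VERDICT (by name: the statement is the Claim_ definition above) =====
theorem is_row_column_square_valid_spec : Claim_equal_is_row_column_square_valid := by
  intro l _
  unfold Spec_is_row_column_square_valid
  rw [alt_eq_finish, is_row_column_square_valid]
  exact pvGo_agree l PySem.Set.empty [] List.nodup_nil
    (by intro v _; simp [PySem.Set.contains, PySem.Set.empty])
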